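-- pv_equiv track=rewrite | github.com/Muzzh/Codefights | TheCore/ListBackwoods/SwapDiagonals.py | swapDiagonals
-- ===== SOURCE A (Python) =====
-- def swapDiagonals(matrix):
--     a = [matrix[x][x] for x in range(len(matrix))]
--     b = [matrix[x][len(matrix)-1-x] for x in range(len(matrix))]
--     f_diag = b
--     s_diag = a
--
--     for i in range(len(f_diag)):
--         matrix[i][i] = f_diag[i]
--     for i in range(len(s_diag)):
--         matrix[i][len(matrix)-1-i] = s_diag[i]
--     return matrix
-- ===== SOURCE B (Python) =====
-- def swapDiagonals(matrix):
--     n = len(matrix)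
--     for i, row in enumerate(matrix):
--         row[i], row[n - 1 - i] = row[n - 1 - i], row[i]
--     return matrix
-- ===== Notes on version B (the rewrite author's own statement) =====
-- stated objective: simpler
-- what changed: Replaces the copy-out-two-diagonal-lists-then-two-overwrite-loops with a single in-place pass that swaps the mirrored pair in each row, keeping no intermediate lists.
import Mathlib
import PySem

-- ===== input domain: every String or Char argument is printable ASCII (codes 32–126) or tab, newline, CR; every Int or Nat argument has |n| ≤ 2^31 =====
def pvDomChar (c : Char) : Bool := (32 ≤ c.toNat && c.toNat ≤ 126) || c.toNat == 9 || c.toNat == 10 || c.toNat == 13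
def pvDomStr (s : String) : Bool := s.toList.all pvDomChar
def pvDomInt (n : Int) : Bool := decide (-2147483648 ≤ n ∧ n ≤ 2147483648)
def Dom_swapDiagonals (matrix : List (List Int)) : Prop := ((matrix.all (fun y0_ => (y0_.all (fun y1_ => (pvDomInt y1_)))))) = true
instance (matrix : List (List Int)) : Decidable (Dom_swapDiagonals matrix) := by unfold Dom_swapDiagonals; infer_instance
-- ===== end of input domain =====

-- B swaps each row's mirrored diagonal pair in one in-place pass; no intermediate diagonal
-- lists. Both A and B mutate `matrix` in place in Python; the equivalence proved here is
-- about the returned value. Ports read with getD (defaults unreachable under Pre_).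

-- ===== PORT A =====
def swapDiagonals (matrix : List (List Int)) : List (List Int) :=
  let n := matrix.length
  let a := (List.range n).map (fun x => (matrix.getD x []).getD x 0)
  let b := (List.range n).map (fun x => (matrix.getD x []).getD (n - 1 - x) 0)
  let fDiag := b
  let sDiag := a
  let m1 := (List.range fDiag.length).foldl
    (fun m i => m.set i ((m.getD i []).set i (fDiag.getD i 0))) matrix
  let m2 := (List.range sDiag.length).foldl
    (fun m i => m.set i ((m.getD i []).set (n - 1 - i) (sDiag.getD i 0))) m1
  m2

-- ===== PORT B =====
def swapDiagonals_alt (matrix : List (List Int)) : List (List Int) :=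
  let n := matrix.length
  matrix.zipIdx.map (fun p =>
    (p.1.set p.2 (p.1.getD (n - 1 - p.2) 0)).set (n - 1 - p.2) (p.1.getD p.2 0))

-- ===== PRECONDITION & SPEC =====
-- Pre_ excludes exactly the inputs on which the Python A raises IndexError:
-- some row i is too short to hold both diagonal entries i and n-1-i.
def Pre_swapDiagonals (matrix : List (List Int)) : Prop :=
  ∀ i ∈ List.range matrix.length,
    i < (matrix.getD i []).length ∧ matrix.length - 1 - i < (matrix.getD i []).length
instance (matrix : List (List Int)) : Decidable (Pre_swapDiagonals matrix) := by
  unfold Pre_swapDiagonals; infer_instance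

def pvWitness_swapDiagonals : List (List Int) := [[1, 2], [3, 4]]

def Spec_swapDiagonals (matrix : List (List Int)) (out : List (List Int)) : Prop := out = swapDiagonals_alt matrix
instance (matrix : List (List Int)) (out : List (List Int)) : Decidable (Spec_swapDiagonals matrix out) := by unfold Spec_swapDiagonals; infer_instance

-- ===== CLAIM (what is proved, stated in full; the proofs are below) =====
def Claim_equal_swapDiagonals : Prop := ∀ (matrix : List (List Int)), Dom_swapDiagonals matrix → Pre_swapDiagonals matrix → Spec_swapDiagonals matrix (swapDiagonals matrix)

-- ===== LEMMAS AND PROOFS =====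

-- One row-indexed update pass: foldl over `range k` where step i rewrites row i as a
-- function of its current contents touches each row at most once, left to right.
theorem foldl_setRow_length (g : Nat → List Int → List Int) (m : List (List Int)) (k : Nat) :
    ((List.range k).foldl (fun m' i => m'.set i (g i (m'.getD i []))) m).length = m.length := by
  induction k with
  | zero => simp
  | succ k ih =>
    rw [List.range_succ, List.foldl_append, List.foldl_cons, List.foldl_nil, List.length_set, ih]

theorem foldl_setRow_getElem? (g : Nat → List Int → List Int) (m : List (List Int)) (k j : Nat) :
    ((List.range k).foldl (fun m' i => m'.set i (g i (m'.getD i []))) m)[j]? =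
      if j < k then (m[j]?.map (g j)) else m[j]? := by
  induction k generalizing j with
  | zero => simp
  | succ k ih =>
    rw [List.range_succ, List.foldl_append, List.foldl_cons, List.foldl_nil]
    have hk : ((List.range k).foldl (fun m' i => m'.set i (g i (m'.getD i []))) m).getD k [] =
        m.getD k [] := by
      rw [List.getD_eq_getElem?_getD, ih k]
      simp [List.getD_eq_getElem?_getD]
    rw [List.getElem?_set, hk, foldl_setRow_length, ih]
    by_cases hjk : k = j
    · subst hjk
      by_cases h : k < m.length
      · rw [if_pos rfl, if_pos h, if_pos (Nat.lt_succ_self k), List.getElem?_eq_getElem h]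
        simp [List.getD, List.getElem?_eq_getElem h]
      · rw [if_pos rfl, if_neg h, if_pos (Nat.lt_succ_self k),
            List.getElem?_eq_none_iff.mpr (Nat.le_of_not_lt h)]
        simp
    · rw [if_neg hjk]
      by_cases h : j < k
      · rw [if_pos h, if_pos (Nat.lt_succ_of_lt h)]
      · rw [if_neg h, if_neg (by omega : ¬ j < k + 1)]

theorem swapDiagonals_spec : Claim_equal_swapDiagonals := by
  intro matrix _ _
  unfold Spec_swapDiagonals swapDiagonals swapDiagonals_alt
  simp only []
  apply List.ext_getElem?
  intro j
  -- lengths of the precomputed diagonal lists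
  have hlen_a : ((List.range matrix.length).map
      (fun x => (matrix.getD x []).getD x 0)).length = matrix.length := by simp
  have hlen_b : ((List.range matrix.length).map
      (fun x => (matrix.getD x []).getD (matrix.length - 1 - x) 0)).length = matrix.length := by
    simp
  rw [hlen_a, hlen_b]
  -- evaluate the two update passes of A via the pass lemma
  rw [foldl_setRow_getElem? (fun i row => row.set (matrix.length - 1 - i)
        (((List.range matrix.length).map (fun x => (matrix.getD x []).getD x 0)).getD i 0)),
      foldl_setRow_getElem? (fun i row => row.set i
        (((List.range matrix.length).map
          (fun x => (matrix.getD x []).getD (matrix.length - 1 - x) 0)).getD i 0))]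
  -- evaluate B's zipIdx.map
  rw [List.getElem?_map, List.getElem?_zipIdx]
  by_cases hj : j < matrix.length
  · have hget : matrix[j]? = some matrix[j] := List.getElem?_eq_getElem hj
    have ha : ((List.range matrix.length).map
        (fun x => (matrix.getD x []).getD x 0)).getD j 0 = (matrix.getD j []).getD j 0 := by
      simp [List.getD, List.getElem?_map, List.getElem?_range hj]
    have hb : ((List.range matrix.length).map
        (fun x => (matrix.getD x []).getD (matrix.length - 1 - x) 0)).getD j 0 =
        (matrix.getD j []).getD (matrix.length - 1 - j) 0 := by
      simp [List.getD, List.getElem?_map, List.getElem?_range hj]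
    have hrow : matrix.getD j [] = matrix[j] := by simp [List.getD, hget]
    simp [hj]
  · simp [hj]
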